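-- pv_equiv track=rewrite | github.com/ryan-pelchat/problem_solutions | Kattis/Easy/leapfrogencryption.py | getIndexesRight
-- ===== SOURCE A (Python) =====
-- def getIndexesRight(arr, leap):
--     if len(arr) < int(leap):
--         return []
--     ls = []  # list of indexes that are empty
--     for i, spot in enumerate(arr):
--         if spot == "":
--             ls.append(i)
--     ls2 = list(range(int(leap) - 1, len(ls), int(leap)))  # list of indexes for leap
--     return [ls[x] for x in ls2]  # returns list of indexes
-- ===== SOURCE B (Python) =====
-- def getIndexesRight(arr, leap):
--     L = int(leap)
--     if len(arr) < L:
--         return []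
--     res = []
--     count = 0
--     for i, spot in enumerate(arr):
--         if spot == "":
--             count += 1
--             if count == L:
--                 res.append(i)
--                 count = 0
--     return res
-- ===== Notes on version B (the rewrite author's own statement) =====
-- stated objective: simpler
-- what changed: The two-phase version (collect all empty-slot indexes into a list, then stride-select every leap-th with a range of positions and a second indexing pass) is fused into a single pass over enumerate(arr) with a reset counter that emits the current index whenever the count of empty slots reaches leap.
import Mathlib
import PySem

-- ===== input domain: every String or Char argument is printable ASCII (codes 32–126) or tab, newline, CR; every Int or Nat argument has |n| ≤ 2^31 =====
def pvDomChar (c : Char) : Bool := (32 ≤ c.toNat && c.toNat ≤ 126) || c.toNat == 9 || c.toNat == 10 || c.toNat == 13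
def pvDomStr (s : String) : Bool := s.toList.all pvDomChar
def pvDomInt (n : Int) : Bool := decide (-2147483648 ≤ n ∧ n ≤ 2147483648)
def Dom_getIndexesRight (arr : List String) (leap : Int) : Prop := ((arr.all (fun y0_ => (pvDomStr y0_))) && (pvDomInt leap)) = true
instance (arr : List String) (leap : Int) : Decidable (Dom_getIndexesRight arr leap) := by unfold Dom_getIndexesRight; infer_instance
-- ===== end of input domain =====

-- B fuses A's two phases (collect empty indexes, then stride-select) into one pass with a reset counter; same cost, simpler.

-- ===== PORT A =====
def getIndexesRight (arr : List String) (leap : Int) : List Int :=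
  if (arr.length : Int) < leap then []
  else
    let ls : List Int := (PySem.List.enumerate arr 0).foldl
      (fun acc p => if p.2 == "" then acc ++ [p.1] else acc) []
    let ls2 := PySem.List.pyRange (leap - 1) (ls.length : Int) leap
    -- ls[x]: every x the range yields is a valid non-negative index of ls, so pyGetD's default is never used
    ls2.map (fun x => PySem.List.pyGetD ls x 0)

-- ===== PORT B =====
def getIndexesRight_alt (arr : List String) (leap : Int) : List Int :=
  if (arr.length : Int) < leap then []
  else
    ((PySem.List.enumerate arr 0).foldl
      (fun (st : List Int × Int) p =>
        if p.2 == "" then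
          (if st.2 + 1 = leap then (st.1 ++ [p.1], 0) else (st.1, st.2 + 1))
        else st)
      ([], 0)).1

-- ===== PRECONDITION & SPEC =====
-- Pre_ excludes exactly leap = 0, where A's range(step=0) raises ValueError.
def Pre_getIndexesRight (arr : List String) (leap : Int) : Prop := leap ≠ 0
instance (arr : List String) (leap : Int) : Decidable (Pre_getIndexesRight arr leap) := by unfold Pre_getIndexesRight; infer_instance
def pvWitness_getIndexesRight : List String × Int := (["", "x", ""], 2)

def Spec_getIndexesRight (arr : List String) (leap : Int) (out : List Int) : Prop := out = getIndexesRight_alt arr leap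
instance (arr : List String) (leap : Int) (out : List Int) : Decidable (Spec_getIndexesRight arr leap out) := by unfold Spec_getIndexesRight; infer_instance

-- ===== CLAIM (what is proved, stated in full; the proofs are below) =====
def Claim_equal_getIndexesRight : Prop := ∀ (arr : List String) (leap : Int), Dom_getIndexesRight arr leap → Pre_getIndexesRight arr leap → Spec_getIndexesRight arr leap (getIndexesRight arr leap)

-- ===== LEMMAS AND PROOFS =====

/-- Every `L`-th element (reset-counter semantics), `c` already counted. -/
def selFrom (L : Int) (c : Int) : List Int → List Int
  | [] => []
  | i :: is => if c + 1 = L then i :: selFrom L 0 is else selFrom L (c + 1) is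

theorem selFrom_nonpos (L : Int) (hL : L ≤ 0) : ∀ (ls : List Int) (c : Int), 0 ≤ c → selFrom L c ls = [] := by
  intro ls
  induction ls with
  | nil => intro c _; rfl
  | cons i is ih =>
    intro c hc
    have hne : ¬ (c + 1 = L) := by omega
    simp only [selFrom, if_neg hne]
    exact ih (c + 1) (by omega)

theorem loopB_eq (L : Int) : ∀ (es : List (Int × String)) (res : List Int) (c : Int),
    (es.foldl (fun (st : List Int × Int) p =>
        if p.2 == "" then
          (if st.2 + 1 = L then (st.1 ++ [p.1], 0) else (st.1, st.2 + 1))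
        else st) (res, c)).1
    = res ++ selFrom L c ((es.filter (fun p => p.2 == "")).map (·.1)) := by
  intro es
  induction es with
  | nil => intro res c; simp [selFrom]
  | cons e es ih =>
    intro res c
    by_cases he : e.2 = ""
    · by_cases hc : c + 1 = L
      · simp only [List.foldl_cons, List.filter_cons, he, beq_self_eq_true, if_pos, if_pos hc,
          List.map_cons, selFrom, ih]
        simp
      · simp only [List.foldl_cons, List.filter_cons, he, beq_self_eq_true, if_pos, if_neg hc,
          List.map_cons, selFrom, ih]
    · have he2 : (e.2 == "") = false := by simpa using he
      simp only [List.foldl_cons, List.filter_cons, he2, Bool.false_eq_true, if_false, ih]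

theorem pyRange_pos_nil (a b L : Int) (hL : 0 < L) (h : b ≤ a) : PySem.List.pyRange a b L = [] := by
  rw [PySem.List.pyRange_of_pos a b hL]
  have : ¬ (a < b) := by omega
  simp [this]

theorem pyRange_neg_nil (a b L : Int) (hL : L < 0) (h : a ≤ b) : PySem.List.pyRange a b L = [] := by
  simp [PySem.List.pyRange, show ¬ (L = 0) by omega, show ¬ (0 < L) by omega, show ¬ (b < a) by omega]

theorem pyRange_pos_cons (a b L : Int) (hL : 0 < L) (h : a < b) :
    PySem.List.pyRange a b L = a :: PySem.List.pyRange (a + L) b L := by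
  rw [PySem.List.pyRange_of_pos a b hL, PySem.List.pyRange_of_pos (a + L) b hL]
  have hcount : (b - a + L - 1) / L = (b - (a + L) + L - 1) / L + 1 := by
    have : b - a + L - 1 = (b - (a + L) + L - 1) + 1 * L := by ring
    rw [this, Int.add_mul_ediv_right _ _ (by omega : L ≠ 0)]
  by_cases h2 : a + L < b
  · have h1 : 0 ≤ (b - (a + L) + L - 1) / L := Int.ediv_nonneg (by omega) (by omega)
    have hcnt : ((b - a + L - 1) / L).toNat = ((b - (a + L) + L - 1) / L).toNat + 1 := by omega
    simp only [h, h2, if_pos, hcnt, List.range_succ_eq_map, List.map_cons, List.map_map]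
    congr 1
    · simp
    · apply List.map_congr_left; intro k _; simp; ring
  · have hz : (b - (a + L) + L - 1) / L = 0 := Int.ediv_eq_zero_of_lt (by omega) (by omega)
    have hc1 : (b - a + L - 1) / L = 1 := by omega
    simp [h, h2, hc1]

theorem pyRange_shift (a b L : Int) (hL : 0 < L) :
    PySem.List.pyRange (a + 1) (b + 1) L = (PySem.List.pyRange a b L).map (· + 1) := by
  rw [PySem.List.pyRange_of_pos a b hL, PySem.List.pyRange_of_pos (a + 1) (b + 1) hL]
  by_cases hab : a < b
  · rw [if_pos (by omega), if_pos hab, show b + 1 - (a + 1) = b - a by ring, List.map_map]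
    apply List.map_congr_left; intro k _; simp; ring
  · rw [if_neg (by omega), if_neg hab]; simp

theorem pyGetD_cons_succ' (x : Int) (xs : List Int) (j d : Int) (hj : 0 ≤ j) :
    PySem.List.pyGetD (x :: xs) (j + 1) d = PySem.List.pyGetD xs j d := by
  obtain ⟨n, rfl⟩ := Int.eq_ofNat_of_zero_le hj
  simp [PySem.List.pyGetD, PySem.List.pyGet?_cons_succ]

theorem A_sel (L : Int) (hL : 0 < L) : ∀ (ls : List Int) (a : Int), 0 ≤ a →
    (PySem.List.pyRange a (ls.length : Int) L).map (fun x => PySem.List.pyGetD ls x 0)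
      = selFrom L (L - 1 - a) ls := by
  intro ls
  induction ls with
  | nil =>
    intro a ha
    rw [pyRange_pos_nil _ _ _ hL (by simpa using ha)]
    rfl
  | cons x xs ih =>
    intro a ha
    have hlen : (((x :: xs).length : Nat) : Int) = (xs.length : Int) + 1 := by
      simp
    rw [hlen]
    rcases eq_or_lt_of_le ha with h0 | hpos
    · subst h0
      rw [pyRange_pos_cons 0 _ L hL (by omega), show ((0 : Int) + L) = (L - 1) + 1 by ring,
        pyRange_shift _ _ _ hL]
      simp only [List.map_cons, List.map_map]
      have hsel : selFrom L (L - 1 - 0) (x :: xs) = x :: selFrom L 0 xs := by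
        simp only [selFrom]
        rw [if_pos (by ring)]
      rw [hsel]
      congr 1
      · simp [PySem.List.pyGetD]
      · have hih := ih (L - 1) (by omega)
        rw [show L - 1 - (L - 1) = (0 : Int) by ring] at hih
        rw [← hih]
        apply List.map_congr_left
        intro j hj
        have hm := (PySem.List.mem_pyRange_iff_of_pos hL j).mp hj
        exact pyGetD_cons_succ' x xs j 0 (by omega)
    · rw [show a = (a - 1) + 1 by ring, pyRange_shift _ _ _ hL, List.map_map]
      have hstep : ((PySem.List.pyRange (a - 1) (xs.length : Int) L).map
          ((fun x_1 => PySem.List.pyGetD (x :: xs) x_1 0) ∘ (· + 1)))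
          = (PySem.List.pyRange (a - 1) (xs.length : Int) L).map (fun j => PySem.List.pyGetD xs j 0) := by
        apply List.map_congr_left
        intro j hj
        have hm := (PySem.List.mem_pyRange_iff_of_pos hL j).mp hj
        exact pyGetD_cons_succ' x xs j 0 (by omega)
      rw [hstep, ih (a - 1) (by omega)]
      simp only [selFrom]
      rw [if_neg (by omega), show L - 1 - ((a - 1) + 1) + 1 = L - 1 - (a - 1) by ring]

-- ===== VERDICT (by name: the statement is the Claim_ definition above) =====
theorem getIndexesRight_spec : Claim_equal_getIndexesRight := by
  unfold Claim_equal_getIndexesRight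
  intro arr leap _ hpre
  unfold Spec_getIndexesRight getIndexesRight getIndexesRight_alt
  by_cases hg : (arr.length : Int) < leap
  · simp [hg]
  · simp only [hg, if_false]
    rw [PySem.List.foldl_append_if (fun (p : Int × String) => p.2 == "") (fun p => p.1)
      (PySem.List.enumerate arr 0) [], loopB_eq leap (PySem.List.enumerate arr 0) [] 0]
    simp only [List.nil_append]
    rcases lt_or_gt_of_ne hpre with hneg | hpos
    · rw [pyRange_neg_nil _ _ _ hneg (by omega), selFrom_nonpos leap (by omega) _ 0 (by omega)]
      rfl
    · rw [A_sel leap hpos _ (leap - 1) (by omega), show leap - 1 - (leap - 1) = 0 by ring]
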